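-- pv_equiv track=rewrite | github.com/gwendo/advent-of-code-2020 | aoc/day6/problem6.py | group_answers
-- ===== SOURCE A (Python) =====
-- def group_answers(lines):
--     groups = []
--     group = set()
--     for l in lines:
--         if not l:
--             groups.append(group)
--             group = set()
--         else:
--             for c in l:
--                 group.add(c)
--     groups.append(group)
--     return sum(map(lambda g: len(g), groups))
-- ===== SOURCE B (Python) =====
-- def group_answers(lines):
--     total = 0
--     i, n = 0, len(lines)
--     while i < n:
--         if lines[i]:
--             chars = set(lines[i])
--             i += 1
--             while i < n and lines[i]:
--                 chars.update(lines[i])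
--                 i += 1
--             total += len(chars)
--         else:
--             i += 1
--     return total
-- ===== Notes on version B (the rewrite author's own statement) =====
-- stated objective: alternative
-- what changed: B scans maximal runs of non-empty lines with an index-based two-level loop and adds each run's distinct-character count directly, instead of A's single pass that accumulates a list of group sets via sentinel-flush and sums their sizes at the end; empty groups are never materialised.
import Mathlib
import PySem

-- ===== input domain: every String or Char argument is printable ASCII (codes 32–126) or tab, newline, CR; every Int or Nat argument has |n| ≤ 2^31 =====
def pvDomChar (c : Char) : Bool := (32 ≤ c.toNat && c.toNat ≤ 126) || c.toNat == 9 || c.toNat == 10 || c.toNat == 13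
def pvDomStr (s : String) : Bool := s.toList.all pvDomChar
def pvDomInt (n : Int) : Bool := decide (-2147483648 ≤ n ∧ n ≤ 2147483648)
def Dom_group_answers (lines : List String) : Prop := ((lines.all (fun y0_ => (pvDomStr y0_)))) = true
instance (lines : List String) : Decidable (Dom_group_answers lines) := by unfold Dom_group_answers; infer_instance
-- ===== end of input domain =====

-- B scans maximal runs of non-empty lines and adds each run's distinct-character count directly,
-- instead of A's sentinel-flush accumulation of a list of group sets summed at the end.

-- ===== PORT A =====
def group_answers (lines : List String) : Int :=
  let st := lines.foldl
    (fun (st : List (PySem.Set Char) × PySem.Set Char) l =>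
      if l = "" then (st.1 ++ [st.2], PySem.Set.empty)
      else (st.1, l.toList.foldl (fun g c => PySem.Set.add g c) st.2))
    ([], PySem.Set.empty)
  ((st.1 ++ [st.2]).map (fun g => (PySem.Set.len g : Int))).sum

-- ===== PORT B =====
mutual
-- outer while loop: skip empty lines, start a run at a non-empty line
def altGo : List String → Int
  | [] => 0
  | l :: rest =>
    if l = "" then altGo rest
    else altCollect rest (PySem.Set.ofList l.toList)
-- inner while loop: extend the current run's character set, then add its size
def altCollect : List String → PySem.Set Char → Int
  | [], s => (PySem.Set.len s : Int)
  | l :: rest, s =>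
    if l = "" then (PySem.Set.len s : Int) + altGo rest
    else altCollect rest (PySem.Set.update s l.toList)
end

def group_answers_alt (lines : List String) : Int := altGo lines

-- ===== PRECONDITION & SPEC =====
def Spec_group_answers (lines : List String) (out : Int) : Prop := out = group_answers_alt lines
instance (lines : List String) (out : Int) : Decidable (Spec_group_answers lines out) := by unfold Spec_group_answers; infer_instance

-- ===== CLAIM (what is proved, stated in full; the proofs are below) =====
def Claim_equal_group_answers : Prop := ∀ (lines : List String), Dom_group_answers lines → Spec_group_answers lines (group_answers lines)

-- ===== LEMMAS AND PROOFS =====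

theorem altCollect_empty (r : List String) :
    altCollect r ([] : PySem.Set Char) = altGo r := by
  cases r with
  | nil => rfl
  | cons l t =>
    by_cases h : l = ""
    · simp [altCollect, altGo, h, PySem.Set.len]
    · simp [altCollect, altGo, h, PySem.Set.update, PySem.Set.ofList_eq_foldl]

theorem foldl_step_sum (lines : List String)
    (groups : List (PySem.Set Char)) (g : PySem.Set Char) :
    (((lines.foldl
        (fun (st : List (PySem.Set Char) × PySem.Set Char) l =>
          if l = "" then (st.1 ++ [st.2], PySem.Set.empty)
          else (st.1, l.toList.foldl (fun g c => PySem.Set.add g c) st.2))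
        (groups, g)).1
      ++ [(lines.foldl
        (fun (st : List (PySem.Set Char) × PySem.Set Char) l =>
          if l = "" then (st.1 ++ [st.2], PySem.Set.empty)
          else (st.1, l.toList.foldl (fun g c => PySem.Set.add g c) st.2))
        (groups, g)).2]).map (fun g => (PySem.Set.len g : Int))).sum
      = (groups.map (fun g => (PySem.Set.len g : Int))).sum + altCollect lines g := by
  induction lines generalizing groups g with
  | nil => simp [altCollect]
  | cons l rest ih =>
    by_cases h : l = ""
    · simp only [List.foldl_cons, h, if_pos]
      rw [ih]
      simp [altCollect, altCollect_empty, add_assoc]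
    · simp only [List.foldl_cons, if_neg h]
      rw [ih]
      simp [altCollect, h, PySem.Set.update]

-- ===== VERDICT (by name: the statement is the Claim_ definition above) =====
theorem group_answers_spec : Claim_equal_group_answers := by
  intro lines _
  unfold Spec_group_answers group_answers group_answers_alt
  have := foldl_step_sum lines [] PySem.Set.empty
  simp only [List.map_nil, List.sum_nil, zero_add] at this
  rw [this]; exact altCollect_empty lines
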